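-- pv_equiv track=rewrite | github.com/aharslan/cortado-core | cortado_core/negative_process_model_repair/removal_strategies/rules_based_reduction/complete_brute_force_subtree_update.py | generate_combinations_of_subsequent_items
-- ===== SOURCE A (Python) =====
-- import copy
--
-- def generate_combinations_of_subsequent_items(list_of_ids: list[int], min_length: int) -> list[list[int]]:
--     combinations = []
--     for i in range(len(list_of_ids)):
--         if len([list_of_ids[i]]) >= min_length:
--             combinations.extend([[list_of_ids[i]]])
--
--         sequence = [list_of_ids[i]]
--         for j in range(i + 1, len(list_of_ids)):
--             sequence.append(list_of_ids[j])
--             if len(sequence) >= min_length: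
--                 combinations.extend(copy.deepcopy([sequence]))
--
--     return sorted(
--         combinations,
--         key=lambda x: len(x),
--         reverse=False,
--     )
-- ===== SOURCE B (Python) =====
-- def generate_combinations_of_subsequent_items(list_of_ids: list[int], min_length: int) -> list[list[int]]:
--     n = len(list_of_ids)
--     result = []
--     for length in range(max(min_length, 1), n + 1):
--         for start in range(0, n - length + 1):
--             result.append(list_of_ids[start:start + length])
--     return result
-- ===== Notes on version B (the rewrite author's own statement) =====
-- stated objective: simpler
-- what changed: B enumerates windows by length in the outer loop and start index in the inner loop using slices, emitting the output already grouped in ascending length order, so A's element-by-element sequence building and final stable sort disappear.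
import Mathlib
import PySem

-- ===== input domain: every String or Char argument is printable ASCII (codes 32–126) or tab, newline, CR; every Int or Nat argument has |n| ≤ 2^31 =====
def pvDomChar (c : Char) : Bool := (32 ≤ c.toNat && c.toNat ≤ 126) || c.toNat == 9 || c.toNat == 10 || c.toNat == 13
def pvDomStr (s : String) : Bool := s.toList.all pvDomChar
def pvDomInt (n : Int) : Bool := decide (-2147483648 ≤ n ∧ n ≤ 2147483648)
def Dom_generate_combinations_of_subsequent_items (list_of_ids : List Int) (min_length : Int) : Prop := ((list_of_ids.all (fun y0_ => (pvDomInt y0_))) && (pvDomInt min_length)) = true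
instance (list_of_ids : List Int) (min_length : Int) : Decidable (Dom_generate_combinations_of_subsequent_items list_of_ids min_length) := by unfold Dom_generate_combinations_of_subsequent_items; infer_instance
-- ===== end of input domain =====

-- ===== PORT A =====
-- B replaces A's per-start-index window building plus final stable sort by a direct
-- length-major enumeration of the same windows; return values proved equal on all inputs.
def generate_combinations_of_subsequent_items (list_of_ids : List Int) (min_length : Int) : List (List Int) :=
  let combinations : List (List Int) :=
    (PySem.List.pyRange 0 (list_of_ids.length : Int) 1).foldl
      (fun combinations i =>
        let combinations :=
          if (([PySem.List.pyGetD list_of_ids i 0].length : Int) ≥ min_length)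
          then combinations ++ [[PySem.List.pyGetD list_of_ids i 0]]
          else combinations
        let st :=
          (PySem.List.pyRange (i + 1) (list_of_ids.length : Int) 1).foldl
            (fun (st : List Int × List (List Int)) j =>
              let sequence := st.1 ++ [PySem.List.pyGetD list_of_ids j 0]
              let combinations :=
                if ((sequence.length : Int) ≥ min_length) then st.2 ++ [sequence] else st.2
              (sequence, combinations))
            ([PySem.List.pyGetD list_of_ids i 0], combinations)
        st.2)
      []
  PySem.List.sorted combinations (fun x => (x.length : Int)) false

-- ===== PORT B =====
def generate_combinations_of_subsequent_items_alt (list_of_ids : List Int) (min_length : Int) : List (List Int) :=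
  (PySem.List.pyRange (max min_length 1) ((list_of_ids.length : Int) + 1) 1).foldl
    (fun result length =>
      (PySem.List.pyRange 0 ((list_of_ids.length : Int) - length + 1) 1).foldl
        (fun result start =>
          result ++ [PySem.List.slice list_of_ids (some start) (some (start + length))])
        result)
    []

-- ===== PRECONDITION & SPEC =====
def Spec_generate_combinations_of_subsequent_items (list_of_ids : List Int) (min_length : Int) (out : List (List Int)) : Prop := out = generate_combinations_of_subsequent_items_alt list_of_ids min_length
instance (list_of_ids : List Int) (min_length : Int) (out : List (List Int)) : Decidable (Spec_generate_combinations_of_subsequent_items list_of_ids min_length out) := by unfold Spec_generate_combinations_of_subsequent_items; infer_instance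

-- ===== CLAIM (what is proved, stated in full; the proofs are below) =====
def Claim_equal_generate_combinations_of_subsequent_items : Prop := ∀ (list_of_ids : List Int) (min_length : Int), Dom_generate_combinations_of_subsequent_items list_of_ids min_length → Spec_generate_combinations_of_subsequent_items list_of_ids min_length (generate_combinations_of_subsequent_items list_of_ids min_length)

-- ===== LEMMAS AND PROOFS =====

theorem pv_slice_len (xs : List Int) (i b : Int) (h0 : 0 ≤ i) (h1 : i ≤ b)
    (h2 : b ≤ (xs.length : Int)) :
    (((PySem.List.slice xs (some i) (some b)).length : Int)) = b - i := by
  rw [PySem.List.slice_toNat xs h0 (by omega)]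
  simp [List.length_take, List.length_drop]
  omega

theorem pv_slice_snoc (xs : List Int) (i j : Int) (h0 : 0 ≤ i) (h1 : i ≤ j)
    (h2 : j < (xs.length : Int)) :
    PySem.List.slice xs (some i) (some j) ++ [PySem.List.pyGetD xs j 0]
      = PySem.List.slice xs (some i) (some (j + 1)) := by
  rw [PySem.List.slice_toNat xs h0 (by omega), PySem.List.slice_toNat xs h0 (by omega),
      PySem.List.pyGetD_eq_getElem xs 0 (by omega) h2]
  have hj : (j+1).toNat - i.toNat = (j.toNat - i.toNat) + 1 := by omega
  rw [hj, List.take_add_one]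
  congr 1
  have : (xs.drop i.toNat)[j.toNat - i.toNat]? = some xs[j.toNat] := by
    rw [List.getElem?_drop]
    have : i.toNat + (j.toNat - i.toNat) = j.toNat := by omega
    rw [this]
    exact List.getElem?_eq_getElem (by omega)
  simp [this]

theorem pv_slice_single (xs : List Int) (i : Int) (h0 : 0 ≤ i) (h1 : i < (xs.length : Int)) :
    [PySem.List.pyGetD xs i 0] = PySem.List.slice xs (some i) (some (i + 1)) := by
  rw [PySem.List.slice_toNat xs h0 (by omega), PySem.List.pyGetD_eq_getElem xs 0 h0 h1]
  have : (i+1).toNat - i.toNat = 1 := by omega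
  rw [this]
  rw [List.take_one]
  rw [List.head?_drop]
  rw [List.getElem?_eq_getElem (by omega)]
  simp

def pvBlock (xs : List Int) (m i : Int) : List (List Int) :=
  (PySem.List.pyRange i (xs.length : Int) 1).flatMap
    (fun j => if m ≤ j + 1 - i then [PySem.List.slice xs (some i) (some (j + 1))] else [])

def pvC (xs : List Int) (m : Int) : List (List Int) :=
  (PySem.List.pyRange 0 (xs.length : Int) 1).flatMap (pvBlock xs m)

def pvKs (xs : List Int) (m : Int) : List Int :=
  PySem.List.pyRange (max m 1) ((xs.length : Int) + 1) 1

def pvGroup (xs : List Int) (L : Int) : List (List Int) :=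
  (PySem.List.pyRange 0 ((xs.length : Int) - L + 1) 1).map
    (fun s => PySem.List.slice xs (some s) (some (s + L)))

theorem pv_inner (xs : List Int) (m i : Int) :
    ∀ (k : Nat) (a : Int) (cs : List (List Int)), ((xs.length : Int) - a).toNat = k →
    0 ≤ i → i < a → a ≤ (xs.length : Int) →
    (PySem.List.pyRange a (xs.length : Int) 1).foldl
      (fun (st : List Int × List (List Int)) j =>
        let sequence := st.1 ++ [PySem.List.pyGetD xs j 0]
        let combinations :=
          if ((sequence.length : Int) ≥ m) then st.2 ++ [sequence] else st.2
        (sequence, combinations))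
      (PySem.List.slice xs (some i) (some a), cs)
    = (PySem.List.slice xs (some i) (some (xs.length : Int)),
       cs ++ (PySem.List.pyRange a (xs.length : Int) 1).flatMap
         (fun j => if m ≤ j + 1 - i then [PySem.List.slice xs (some i) (some (j + 1))] else [])) := by
  intro k
  induction k with
  | zero =>
    intro a cs hk h0 h1 h2
    have ha : a = (xs.length : Int) := by omega
    subst ha
    rw [PySem.List.pyRange_one_eq_nil le_rfl]
    simp
  | succ k ih =>
    intro a cs hk h0 h1 h2
    have ha : a < (xs.length : Int) := by omega
    rw [PySem.List.pyRange_one_cons ha, List.foldl_cons, List.flatMap_cons]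
    simp only
    rw [pv_slice_snoc xs i a h0 (by omega) ha]
    have hlen : (((PySem.List.slice xs (some i) (some (a+1))).length : Int)) = a + 1 - i :=
      pv_slice_len xs i (a+1) h0 (by omega) (by omega)
    rw [hlen]
    have hrec := ih (a+1) (if a + 1 - i ≥ m then cs ++ [PySem.List.slice xs (some i) (some (a+1))] else cs)
      (by omega) h0 (by omega) (by omega)
    by_cases hc : m ≤ a + 1 - i
    · rw [if_pos (by omega)] at hrec
      rw [if_pos (show a + 1 - i ≥ m by omega), if_pos hc, ← List.append_assoc]
      exact hrec
    · rw [if_neg (by omega)] at hrec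
      rw [if_neg (show ¬ a + 1 - i ≥ m by omega), if_neg hc, List.nil_append]
      exact hrec

theorem pv_flatMap_indicator {α : Type} (w : α) (t : Int) :
    ∀ l : List Int, l.Nodup →
    (l.flatMap fun j => if j = t then [w] else []) = if t ∈ l then [w] else [] := by
  intro l
  induction l with
  | nil => simp
  | cons a r ih =>
    intro hnd
    rw [List.flatMap_cons, ih hnd.of_cons]
    by_cases h : a = t
    · subst h
      have : a ∉ r := (List.nodup_cons.mp hnd).1
      simp [this]
    · simp [h, Ne.symm h]

theorem pv_insertBy_pass {α : Type} (before : α → α → Bool) (x : α) (P S : List α)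
    (h : ∀ y ∈ P, before x y = false) :
    PySem.List.insertBy before x (P ++ S) = P ++ PySem.List.insertBy before x S := by
  induction P with
  | nil => simp
  | cons p t ih =>
    have hp : before x p = false := h p (by simp)
    simp only [List.cons_append, PySem.List.insertBy, hp]
    simp only [Bool.false_eq_true, if_false]
    rw [ih (fun y hy => h y (by simp [hy]))]

theorem pv_insertBy_front {α : Type} (before : α → α → Bool) (x : α) (L : List α)
    (h : ∀ y ∈ L, before x y = true) :
    PySem.List.insertBy before x L = x :: L := by
  cases L with
  | nil => rfl
  | cons p t => simp [PySem.List.insertBy, h p (by simp)]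

theorem pv_insertBy_grouped {α : Type} (key : α → Int) (x : α) :
    ∀ (ks : List Int) (g : Int → List α), ks.Pairwise (· < ·) → key x ∈ ks →
    (∀ k ∈ ks, ∀ y ∈ g k, key y = k) →
    PySem.List.insertBy (fun a b => decide (key a < key b)) x (ks.flatMap g)
      = ks.flatMap (fun k => if k = key x then g k ++ [x] else g k) := by
  intro ks
  induction ks with
  | nil => intro g _ hmem _; simp at hmem
  | cons k t ih =>
    intro g hp hmem hg
    have hpt := (List.pairwise_cons.mp hp).2
    have hlt := (List.pairwise_cons.mp hp).1
    by_cases hk : k = key x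
    · -- pass over g k (keys equal), then go before everything in t.flatMap g
      rw [List.flatMap_cons, pv_insertBy_pass _ _ (g k) _
          (fun y hy => by simp [hg k (by simp) y hy, hk]),
          pv_insertBy_front _ _ _ (fun y hy => by
            obtain ⟨k', hk', hy'⟩ := List.mem_flatMap.mp hy
            have := hg k' (by simp [hk']) y hy'
            have := hlt k' hk'
            simp [‹key y = k'›]; omega)]
      rw [List.flatMap_cons, if_pos hk]
      have : t.flatMap (fun k' => if k' = key x then g k' ++ [x] else g k') = t.flatMap g := by
        apply List.flatMap_congr
        intro k' hk'
        have : k < k' := hlt k' hk'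
        rw [if_neg (by omega)]
      rw [this]
      simp
    · have hx : key x ∈ t := by
        rcases List.mem_cons.mp hmem with h | h
        · exact absurd h.symm hk
        · exact h
      have hkx : k < key x := hlt _ hx
      rw [List.flatMap_cons, pv_insertBy_pass _ _ (g k) _
          (fun y hy => by simp [hg k (by simp) y hy]; omega),
          ih g hpt hx (fun k' hk' => hg k' (by simp [hk']))]
      rw [List.flatMap_cons, if_neg hk]

theorem pv_sorted_grouped {α : Type} (key : α → Int) (ks : List Int)
    (hks : ks.Pairwise (· < ·)) :
    ∀ xs : List α, (∀ x ∈ xs, key x ∈ ks) →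
    PySem.List.sorted xs key false
      = ks.flatMap (fun k => xs.filter (fun x => decide (key x = k))) := by
  intro xs
  induction xs using List.reverseRecOn with
  | nil => intro _; simp [PySem.List.sorted]
  | append_singleton xs x ih =>
    intro hkeys
    rw [PySem.List.sorted_eq_foldl_insertBy, List.foldl_append, List.foldl_cons, List.foldl_nil,
        ← PySem.List.sorted_eq_foldl_insertBy,
        ih (fun y hy => hkeys y (by simp [hy])),
        pv_insertBy_grouped key x ks _ hks (hkeys x (by simp))
          (fun k _ y hy => by simpa using (List.mem_filter.mp hy).2)]
    apply List.flatMap_congr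
    intro k hk
    rw [List.filter_append]
    by_cases h : k = key x
    · rw [if_pos h]; simp [List.filter, h]
    · rw [if_neg h]
      have : (fun y => decide (key y = k)) x = false := by simp; exact fun hh => h hh.symm
      simp [this]

theorem pv_A_comb (xs : List Int) (m : Int) :
    generate_combinations_of_subsequent_items xs m
      = PySem.List.sorted (pvC xs m) (fun x => (x.length : Int)) false := by
  unfold generate_combinations_of_subsequent_items
  simp only []
  congr 1
  rw [PySem.List.foldl_congr_mem _ _ (fun combs i => combs ++ pvBlock xs m i) []
    (by
      intro combs i hi
      obtain ⟨hi0, hi1⟩ := PySem.List.mem_pyRange_one.mp hi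
      have hblock : pvBlock xs m i
          = (if m ≤ (1:Int) then [PySem.List.slice xs (some i) (some (i+1))] else [])
            ++ (PySem.List.pyRange (i+1) (xs.length : Int) 1).flatMap
              (fun j => if m ≤ j + 1 - i then [PySem.List.slice xs (some i) (some (j + 1))] else []) := by
        unfold pvBlock
        rw [PySem.List.pyRange_one_cons hi1, List.flatMap_cons]
        have h1 : i + 1 - i = (1:Int) := by omega
        rw [h1]
      by_cases hm : m ≤ (1:Int)
      · rw [if_pos (show (([PySem.List.pyGetD xs i 0].length : Nat) : Int) ≥ m by simp; omega)]
        rw [pv_slice_single xs i hi0 hi1]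
        rw [pv_inner xs m i ((xs.length : Int) - (i+1)).toNat (i+1)
          (combs ++ [PySem.List.slice xs (some i) (some (i+1))]) rfl hi0 (by omega) (by omega)]
        show _ = combs ++ pvBlock xs m i
        rw [hblock, if_pos hm, ← List.append_assoc]
      · rw [if_neg (show ¬ (([PySem.List.pyGetD xs i 0].length : Nat) : Int) ≥ m by simp; omega)]
        rw [pv_slice_single xs i hi0 hi1]
        rw [pv_inner xs m i ((xs.length : Int) - (i+1)).toNat (i+1) combs rfl hi0 (by omega) (by omega)]
        show _ = combs ++ pvBlock xs m i
        rw [hblock, if_neg hm, List.nil_append])]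
  rw [PySem.List.foldl_append_eq_flatMap]
  simp [pvC]

theorem pv_B_eq (xs : List Int) (m : Int) :
    generate_combinations_of_subsequent_items_alt xs m = (pvKs xs m).flatMap (pvGroup xs) := by
  unfold generate_combinations_of_subsequent_items_alt
  rw [PySem.List.foldl_congr_mem _ _ (fun res L => res ++ pvGroup xs L) []
    (by
      intro res L _
      rw [PySem.List.foldl_append_singleton_eq_map]
      rfl)]
  rw [PySem.List.foldl_append_eq_flatMap]
  rfl

theorem pv_C_keys (xs : List Int) (m : Int) :
    ∀ w ∈ pvC xs m, ((w.length : Int)) ∈ pvKs xs m := by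
  intro w hw
  obtain ⟨i, hi, hw⟩ := List.mem_flatMap.mp hw
  obtain ⟨j, hj, hw⟩ := List.mem_flatMap.mp hw
  obtain ⟨hi0, hi1⟩ := PySem.List.mem_pyRange_one.mp hi
  obtain ⟨hj0, hj1⟩ := PySem.List.mem_pyRange_one.mp hj
  by_cases hc : m ≤ j + 1 - i
  · rw [if_pos hc] at hw
    rw [List.mem_singleton.mp hw]
    rw [pv_slice_len xs i (j+1) hi0 (by omega) (by omega)]
    exact PySem.List.mem_pyRange_one.mpr ⟨by omega, by omega⟩
  · rw [if_neg hc] at hw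
    simp at hw

theorem pv_C_filter (xs : List Int) (m L : Int) (hL : L ∈ pvKs xs m) :
    (pvC xs m).filter (fun w => decide (((w.length : Int)) = L)) = pvGroup xs L := by
  obtain ⟨hL0, hL1⟩ := PySem.List.mem_pyRange_one.mp hL
  have hm : m ≤ L := le_trans (le_max_left m 1) hL0
  have h1 : (1:Int) ≤ L := le_trans (le_max_right m 1) hL0
  have hn : L ≤ (xs.length : Int) := by omega
  unfold pvC
  rw [List.filter_flatMap]
  have step1 : ∀ i ∈ PySem.List.pyRange 0 (xs.length : Int) 1,
      (pvBlock xs m i).filter (fun w => decide (((w.length : Int)) = L))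
        = if i + L ≤ (xs.length : Int) then [PySem.List.slice xs (some i) (some (i + L))] else [] := by
    intro i hi
    obtain ⟨hi0, hi1⟩ := PySem.List.mem_pyRange_one.mp hi
    unfold pvBlock
    rw [List.filter_flatMap]
    rw [List.flatMap_congr (g := fun j => if j = i + L - 1 then [PySem.List.slice xs (some i) (some (i + L))] else [])
      (by
        intro j hj
        show _ = if j = i + L - 1 then [PySem.List.slice xs (some i) (some (i + L))] else []
        obtain ⟨hj0, hj1⟩ := PySem.List.mem_pyRange_one.mp hj
        by_cases hc : m ≤ j + 1 - i
        · rw [if_pos hc]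
          by_cases he : j + 1 - i = L
          · have hj1 : j + 1 = i + L := by omega
            rw [hj1]
            have hd : decide ((((PySem.List.slice xs (some i) (some (i + L))).length : Nat) : Int) = L) = true := by
              rw [pv_slice_len xs i (i + L) hi0 (by omega) (by omega)]
              simp only [decide_eq_true_eq]; omega
            simp only [List.filter_singleton, hd, cond_true]
            rw [if_pos (by omega)]
          · have hd : decide ((((PySem.List.slice xs (some i) (some (j + 1))).length : Nat) : Int) = L) = false := by
              rw [pv_slice_len xs i (j + 1) hi0 (by omega) (by omega)]
              simp only [decide_eq_false_iff_not]; omega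
            simp only [List.filter_singleton, hd, cond_false]
            rw [if_neg (by omega)]
        · rw [if_neg hc, if_neg (by omega)]
          rfl)]
    rw [pv_flatMap_indicator _ _ _ (PySem.List.nodup_pyRange_one _ _)]
    by_cases hc : i + L ≤ (xs.length : Int)
    · rw [if_pos (PySem.List.mem_pyRange_one.mpr ⟨by omega, by omega⟩), if_pos hc]
    · rw [if_neg (fun hmem => hc (by
        obtain ⟨_, h⟩ := PySem.List.mem_pyRange_one.mp hmem; omega)), if_neg hc]
  rw [List.flatMap_congr step1]
  rw [PySem.List.pyRange_one_append 0 ((xs.length : Int) - L + 1) (xs.length : Int) (by omega) (by omega),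
      List.flatMap_append]
  have h2 : (PySem.List.pyRange ((xs.length : Int) - L + 1) (xs.length : Int) 1).flatMap
      (fun i => if i + L ≤ (xs.length : Int) then [PySem.List.slice xs (some i) (some (i + L))] else []) = [] := by
    rw [List.flatMap_congr (g := fun _ => ([] : List (List Int)))
      (by
        intro i hi
        obtain ⟨hi0, _⟩ := PySem.List.mem_pyRange_one.mp hi
        rw [if_neg (by omega)])]
    simp
  rw [h2, List.append_nil]
  rw [List.flatMap_congr (g := fun i => [PySem.List.slice xs (some i) (some (i + L))])
    (by
      intro i hi
      obtain ⟨_, hi1⟩ := PySem.List.mem_pyRange_one.mp hi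
      rw [if_pos (by omega)])]
  rw [← List.map_eq_flatMap]
  rfl

-- ===== VERDICT (by name: the statement is the Claim_ definition above) =====
theorem generate_combinations_of_subsequent_items_spec : Claim_equal_generate_combinations_of_subsequent_items := by
  intro xs m _
  unfold Spec_generate_combinations_of_subsequent_items
  rw [pv_A_comb, pv_B_eq,
      pv_sorted_grouped (fun x => ((x.length : Nat) : Int)) (pvKs xs m)
        (PySem.List.pairwise_lt_pyRange_one _ _) (pvC xs m) (pv_C_keys xs m)]
  exact List.flatMap_congr (fun L hL => pv_C_filter xs m L hL)
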